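-- pv_equiv track=rewrite | github.com/Reynouts/AoC19 | AoC19/day4.py | check
-- ===== SOURCE A (Python) =====
-- def check(number):
--     rep = str(number)
--     last = "0"
--     match, twice, found = False, False, False
--     for i in rep:
--         if int(i) < int(last):
--             return False
--         if i == last:
--             if match:
--                 twice = False
--             else:
--                 match, twice = True, True
--         else:
--             if twice and match:
--                 found = True
--             match, twice = False, False
--         last = i
--     return found or (twice and match)
-- ===== SOURCE B (Python) =====
-- from itertools import groupby
--
-- def check(number):
--     digits = [int(c) for c in str(number)]
--     if any(a > b for a, b in zip(digits, digits[1:])):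
--         return False
--     return any(sum(1 for _ in g) == 2 for _, g in groupby(digits))
-- ===== Notes on version B (the rewrite author's own statement) =====
-- stated objective: simpler
-- what changed: Replaced A's single-pass five-variable state machine (last/match/twice/found with in-loop early return) by two declarative passes: a pairwise zip check that the digits are non-decreasing, then an itertools.groupby pass asking whether any run has length exactly 2.
-- intended difference: On number == 0 (the only input whose first digit is 0), A's sentinel last='0' makes the lone digit count as a double and A returns True; B returns False, the intended value since '0' contains no digit occurring exactly twice. — e.g. on check(0): A returns true, B returns false
import Mathlib
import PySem

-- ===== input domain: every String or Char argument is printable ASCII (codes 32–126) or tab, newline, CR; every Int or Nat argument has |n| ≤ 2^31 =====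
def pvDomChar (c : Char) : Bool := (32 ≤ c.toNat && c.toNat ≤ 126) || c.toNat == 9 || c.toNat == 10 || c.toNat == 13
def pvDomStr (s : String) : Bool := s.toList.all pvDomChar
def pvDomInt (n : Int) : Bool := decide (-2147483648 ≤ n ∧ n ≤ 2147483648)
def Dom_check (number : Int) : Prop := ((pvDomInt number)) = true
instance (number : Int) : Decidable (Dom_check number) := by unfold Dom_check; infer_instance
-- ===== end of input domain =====

-- B replaces A's hand-rolled five-variable state machine by two declarative passes
-- (a pairwise non-decreasing check, then a run-length grouping pass looking for a
-- run of exactly length 2); same O(d) cost, simpler decomposition.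

-- ===== PORT A =====
-- Python's `last` is always a single-character string; it is ported as a Char,
-- `i == last` as Char equality and int(i) as PySem.Int.ofChars? [i] (exact).
def checkLoop : List Char → Char → Bool → Bool → Bool → Bool
  | [], _, mtch, twice, found => found || (twice && mtch)
  | i :: rest, last, mtch, twice, found =>
    match PySem.Int.ofChars? [i], PySem.Int.ofChars? [last] with
    | some iv, some lv =>
      if iv < lv then false
      else if i == last then
        if mtch then checkLoop rest i mtch false found
        else checkLoop rest i true true found
      else
        if twice && mtch then checkLoop rest i false false true
        else checkLoop rest i false false found
    | _, _ => false  -- int(i) raises ValueError (the '-' of a negative number); excluded by Pre_check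

def check (number : Int) : Bool :=
  checkLoop (PySem.Int.toStr number).toList '0' false false false

-- ===== PORT B =====
-- run lengths of itertools.groupby, ported by hand (sum(1 for _ in g) per group)
def glAux (cur : Int) (cnt : Nat) : List Int → List Nat
  | [] => [cnt]
  | d :: ds => if d == cur then glAux cur (cnt + 1) ds else cnt :: glAux d 1 ds

def groupLens : List Int → List Nat
  | [] => []
  | d :: ds => glAux d 1 ds

def check_alt (number : Int) : Bool :=
  let digits := (PySem.Int.toStr number).toList.map
    (fun c => (PySem.Int.ofChars? [c]).getD 0)  -- int(c); none (ValueError on '-') only outside Pre_check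
  if (digits.zip (PySem.List.slice digits (some 1) none)).any (fun p => decide (p.2 < p.1)) then false
  else (groupLens digits).any (fun k => k == 2)

-- ===== PRECONDITION & SPEC =====
-- Pre_check excludes negative numbers: str(number) then contains '-', on which int('-')
-- raises ValueError in both A and B.
def Pre_check (number : Int) : Prop := 0 ≤ number
instance (number : Int) : Decidable (Pre_check number) := by unfold Pre_check; infer_instance
def pvWitness_check : Int := 122

-- On number == 0, A's sentinel last = "0" makes the lone digit '0' count as a double and A
-- returns True; B returns False, the intended value since "0" has no digit occurring exactly twice.
def D_check (number : Int) : Prop := number = 0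
instance (number : Int) : Decidable (D_check number) := by unfold D_check; infer_instance

def Spec_check (number : Int) (out : Bool) : Prop := ¬ D_check number → out = check_alt number
instance (number : Int) (out : Bool) : Decidable (Spec_check number out) := by unfold Spec_check; infer_instance

def pvDiffWitness_check : Int := 0
def pvDiffWitnessOut_check : Bool × Bool := (true, false)

-- ===== CLAIM (what is proved, stated in full; the proofs are below) =====
def Claim_unchanged_check : Prop := ∀ (number : Int), Dom_check number → Pre_check number → Spec_check number (check number)
def Claim_changed_check : Prop := Dom_check (pvDiffWitness_check) ∧ Pre_check (pvDiffWitness_check) ∧ D_check (pvDiffWitness_check) ∧ check (pvDiffWitness_check) = pvDiffWitnessOut_check.1 ∧ check_alt (pvDiffWitness_check) = pvDiffWitnessOut_check.2 ∧ pvDiffWitnessOut_check.1 ≠ pvDiffWitnessOut_check.2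
def Claim_exact_check : Prop := ∀ (number : Int), Dom_check number → Pre_check number → D_check number → check number ≠ check_alt number

-- ===== LEMMAS AND PROOFS =====

-- digits of n, most significant first (proof-side mirror of str(n) for n ≥ 0)
def digitsOf (n : Nat) : List Nat :=
  if n < 10 then [n] else digitsOf (n / 10) ++ [n % 10]
decreasing_by exact Nat.div_lt_self (by omega) (by omega)

theorem toDigitsCore_eq (f : Nat) : ∀ (n : Nat) (acc : List Char), n / 10 < f →
    Nat.toDigitsCore 10 f n acc = (digitsOf n).map Nat.digitChar ++ acc := by
  induction f with
  | zero => intro n acc h; omega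
  | succ f ih =>
    intro n acc h
    rw [Nat.toDigitsCore, digitsOf]
    by_cases h10 : n < 10
    · have : n / 10 = 0 := by omega
      simp [this, Nat.mod_eq_of_lt h10, if_pos h10]
    · have hne : n / 10 ≠ 0 := by omega
      simp only [if_neg h10]
      split
      · omega
      · rw [ih (n / 10) _ (by
          have := Nat.div_lt_self (by omega : 0 < n / 10) (by omega : 1 < 10)
          omega)]
        simp

theorem toChars_nonneg (number : Int) (h : 0 ≤ number) :
    PySem.Int.toChars number = (digitsOf number.toNat).map Nat.digitChar := by
  rw [PySem.Int.toChars, if_neg (by omega), Nat.toDigits,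
    toDigitsCore_eq _ _ _ (by have := Nat.div_le_self number.toNat 10; omega)]
  simp

theorem digitsOf_lt (n : Nat) : ∀ d ∈ digitsOf n, d < 10 := by
  induction n using Nat.strong_induction_on with
  | _ n ih =>
    rw [digitsOf]
    by_cases h10 : n < 10
    · simp [h10]
    · simp only [if_neg h10, List.mem_append, List.mem_singleton]
      intro d hd
      rcases hd with hd | hd
      · exact ih (n / 10) (Nat.div_lt_self (by omega) (by omega)) d hd
      · omega

theorem digitsOf_head (n : Nat) (hn : 0 < n) :
    ∃ h t, digitsOf n = h :: t ∧ 0 < h := by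
  induction n using Nat.strong_induction_on with
  | _ n ih =>
    rw [digitsOf]
    by_cases h10 : n < 10
    · exact ⟨n, [], by simp [h10], hn⟩
    · obtain ⟨h, t, ht, hh⟩ := ih (n / 10) (Nat.div_lt_self (by omega) (by omega)) (by omega)
      exact ⟨h, t ++ [n % 10], by simp [h10, ht], hh⟩

def M : List Int → Int → Bool → Bool → Bool → Bool
  | [], _, mtch, twice, found => found || (twice && mtch)
  | d :: ds, last, mtch, twice, found =>
    if d < last then false
    else if d = last then
      if mtch then M ds d mtch false found else M ds d true true found
    else
      if twice && mtch then M ds d false false true else M ds d false false found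
def nondecFrom : Int → List Int → Bool
  | _, [] => true
  | l, d :: ds => decide (l ≤ d) && nondecFrom d ds
theorem ofChars_digitChar (d : Nat) (h : d < 10) :
    PySem.Int.ofChars? [Nat.digitChar d] = some (Int.ofNat d) := by
  interval_cases d <;> decide
theorem digitChar_beq (a b : Nat) (ha : a < 10) (hb : b < 10) :
    (Nat.digitChar a == Nat.digitChar b) = (a == b) := by
  interval_cases a <;> interval_cases b <;> decide

theorem checkLoop_eq_M (ds : List Nat) : ∀ (l : Nat) (m t f : Bool),
    (∀ d ∈ ds, d < 10) → l < 10 →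
    checkLoop (ds.map Nat.digitChar) (Nat.digitChar l) m t f
      = M (ds.map Int.ofNat) (Int.ofNat l) m t f := by
  induction ds with
  | nil => intro l m t f _ _; rfl
  | cons d ds ih =>
    intro l m t f hds hl
    have hd : d < 10 := hds d (List.mem_cons_self ..)
    have hrest : ∀ x ∈ ds, x < 10 := fun x hx => hds x (List.mem_cons_of_mem _ hx)
    simp only [List.map_cons, checkLoop, M, ofChars_digitChar d hd, ofChars_digitChar l hl]
    by_cases h1 : Int.ofNat d < Int.ofNat l
    · rw [if_pos h1, if_pos h1]
    · rw [if_neg h1, if_neg h1]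
      by_cases h2 : d = l
      · subst h2
        rw [if_pos rfl, if_pos (beq_self_eq_true (Nat.digitChar d))]
        cases m
        · rw [if_neg (by simp), if_neg (by simp)]
          exact ih d true true f hrest hd
        · rw [if_pos rfl, if_pos rfl]
          exact ih d true false f hrest hd
      · rw [if_neg (by rw [digitChar_beq d l hd hl]; simp [h2]),
          if_neg (fun hc => h2 (Int.ofNat.inj hc))]
        cases htm : (t && m)
        · rw [if_neg (by simp), if_neg (by simp)]
          exact ih d false false f hrest hd
        · rw [if_pos (by simp), if_pos (by simp)]
          exact ih d false false true hrest hd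

theorem M_eq (ds : List Int) : ∀ (l : Int) (cnt : Nat) (m t f : Bool), 1 ≤ cnt →
    m = decide (2 ≤ cnt) → t = decide (cnt = 2) →
    M ds l m t f = (nondecFrom l ds && (f || (glAux l cnt ds).any (fun k => k == 2))) := by
  induction ds with
  | nil =>
    intro l cnt m t f hc hm ht
    subst hm ht
    simp only [M, nondecFrom, glAux, List.any_cons, List.any_nil, Bool.true_and, Bool.or_false]
    by_cases h : cnt = 2 <;> cases f <;> simp [h]
  | cons d ds ih =>
    intro l cnt m t f hc hm ht
    subst hm ht
    simp only [M, nondecFrom, glAux]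
    by_cases h1 : d < l
    · simp [h1, show ¬ l ≤ d by omega]
    · simp only [if_neg h1, decide_eq_true_eq, decide_eq_true (by omega : l ≤ d), Bool.true_and]
      by_cases h2 : d = l
      · subst h2
        simp only [beq_self_eq_true, if_true]
        by_cases hc2 : 2 ≤ cnt
        · rw [if_pos (by simp [hc2]),
            ih d (cnt + 1) _ _ f (by omega) (by rw [decide_eq_decide]; omega)
              (Eq.symm (by simp only [decide_eq_false_iff_not]; omega))]
        · have hcnt1 : cnt = 1 := by omega
          subst hcnt1
          rw [if_neg (by simp),
            ih d 2 true true f (by omega) (by simp) (by simp)]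
      · simp only [if_neg h2, beq_eq_false_iff_ne.mpr h2, Bool.false_eq_true, if_false,
          List.any_cons]
        by_cases hc2 : cnt = 2
        · subst hc2
          rw [if_pos (by simp),
            ih d 1 false false true (by omega) (by simp) (by simp)]
          simp
        · rw [if_neg (by simp [hc2]),
            ih d 1 false false f (by omega) (by simp) (by simp)]
          simp [beq_eq_false_iff_ne.mpr hc2]

theorem zip_any_gt (rest : List Int) : ∀ d : Int,
    ((d :: rest).zip rest).any (fun p => decide (p.2 < p.1)) = !(nondecFrom d rest) := by
  induction rest with
  | nil => intro d; rfl
  | cons e rs ih =>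
    intro d
    simp only [List.zip_cons_cons, List.any_cons, nondecFrom, ih e, Bool.not_and]
    by_cases h : d ≤ e <;> simp [h, show (e < d ↔ ¬ d ≤ e) by omega]

theorem check_eq_check_alt (number : Int) (h0 : 0 ≤ number) (hne : number ≠ 0) :
    check number = check_alt number := by
  obtain ⟨h, t, hdig, hh⟩ := digitsOf_head number.toNat (by omega)
  have hlt : ∀ d ∈ (h :: t), d < 10 := hdig ▸ digitsOf_lt number.toNat
  have hh10 : h < 10 := hlt h (List.mem_cons_self ..)
  have hchars : (PySem.Int.toStr number).toList = (h :: t).map Nat.digitChar := by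
    rw [PySem.Int.toList_toStr, toChars_nonneg number h0, hdig]
  -- A side
  have hA : check number
      = (nondecFrom (Int.ofNat h) (t.map Int.ofNat)
          && (glAux (Int.ofNat h) 1 (t.map Int.ofNat)).any (fun k => k == 2)) := by
    rw [check, hchars, show '0' = Nat.digitChar 0 from rfl,
      checkLoop_eq_M (h :: t) 0 false false false hlt (by omega), List.map_cons]
    simp only [M]
    rw [if_neg (by simp), if_neg (fun hc => by have := Int.ofNat.inj hc; omega),
      if_neg (by simp),
      M_eq (t.map Int.ofNat) (Int.ofNat h) 1 false false false (by omega) (by simp) (by simp)]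
    simp
  -- B side
  have hB : check_alt number
      = (if (!(nondecFrom (Int.ofNat h) (t.map Int.ofNat))) = true then false
         else (glAux (Int.ofNat h) 1 (t.map Int.ofNat)).any (fun k => k == 2)) := by
    rw [check_alt]
    simp only [hchars, List.map_map]
    have hmap : (h :: t).map ((fun c => (PySem.Int.ofChars? [c]).getD 0) ∘ Nat.digitChar)
        = (h :: t).map Int.ofNat := by
      apply List.map_congr_left
      intro d hd
      simp [Function.comp, ofChars_digitChar d (hlt d hd)]
    rw [hmap, List.map_cons, PySem.List.slice_from_one, List.tail_cons,
      zip_any_gt (t.map Int.ofNat) (Int.ofNat h)]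
    rfl
  rw [hA, hB]
  cases hnd : nondecFrom (Int.ofNat h) (t.map Int.ofNat) <;> simp

-- ===== VERDICT (by name: the statement is the Claim_ definition above) =====
theorem check_spec : Claim_unchanged_check := by
  intro number _ hpre hD
  exact check_eq_check_alt number hpre hD

theorem check_changed : Claim_changed_check := by
  unfold Claim_changed_check; decide

theorem check_tight : Claim_exact_check := by
  intro number _ _ hD
  rw [show number = 0 from hD]
  decide
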